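-- pv_equiv track=rewrite | github.com/gianniboccazzi/Teoria-de-Algoritmos-1 | Practica-Parcial/greedy.py | bolsas_super
-- ===== SOURCE A (Python) =====
-- def bolsas_super(productos, P):
--     productos = sorted(productos, reverse=True)
--     bolsas = []
--     agregados = set()
--     for i in range(len(productos)):
--         bolsa_actual = []
--         cant_actual = 0
--         if i in agregados:
--             continue
--         bolsa_actual.append(productos[i])
--         cant_actual += productos[i]
--         agregados.add(i)
--         if cant_actual == P:
--             bolsas.append(bolsa_actual)
--             continue
--         for j in range(i, len(productos)):
--             if j in agregados:
--                 continue
--             if productos[j] + cant_actual <= P: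
--                 bolsa_actual.append(productos[j])
--                 cant_actual += productos[j]
--                 agregados.add(j)
--             if cant_actual == P:
--                 break
--         bolsas.append(bolsa_actual)
--     return bolsas
-- ===== SOURCE B (Python) =====
-- def bolsas_super(productos, P):
--     # Same greedy result, but instead of an index set plus full rescans from i,
--     # keep only the still-unpacked items in a shrinking list.
--     rest = sorted(productos, reverse=True)
--     bolsas = []
--     while rest:
--         x = rest[0]
--         if x == P:
--             bolsas.append([x])
--             rest = rest[1:]
--             continue
--         cant = x
--         bolsa = [x]
--         leftover = []
--         i = 1
--         n = len(rest)
--         while i < n: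
--             y = rest[i]
--             i += 1
--             if y + cant <= P:
--                 bolsa.append(y)
--                 cant += y
--                 if cant == P:
--                     break
--             else:
--                 leftover.append(y)
--         leftover.extend(rest[i:])
--         bolsas.append(bolsa)
--         rest = leftover
--     return bolsas
-- ===== Notes on version B (the rewrite author's own statement) =====
-- stated objective: alternative
-- what changed: A tracks a set of used indices and rescans the whole index range (including already-packed indices) for every bag; B keeps only the still-unpacked items in a shrinking list and fills each bag with one pass over that list, so the used-index set and the rescans of packed indices disappear.
import Mathlib
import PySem

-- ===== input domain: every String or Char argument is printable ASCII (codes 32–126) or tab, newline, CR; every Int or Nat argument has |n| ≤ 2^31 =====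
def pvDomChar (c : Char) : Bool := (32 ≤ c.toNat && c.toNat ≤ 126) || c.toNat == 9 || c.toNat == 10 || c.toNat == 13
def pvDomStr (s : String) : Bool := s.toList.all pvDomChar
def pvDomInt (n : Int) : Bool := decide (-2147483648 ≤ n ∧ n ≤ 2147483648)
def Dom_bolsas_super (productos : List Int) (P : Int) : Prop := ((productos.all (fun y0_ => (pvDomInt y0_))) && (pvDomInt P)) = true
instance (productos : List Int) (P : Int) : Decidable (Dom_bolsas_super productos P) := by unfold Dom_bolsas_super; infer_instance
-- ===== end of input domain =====

-- B replaces A's used-index set (with full rescans of already-packed indices) by a shrinking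
-- list that holds only the still-unpacked items; same greedy result. Objective: alternative.

-- ===== PORT A =====
-- inner loop 'for j in range(i, len(productos))' with continue/break, state (bolsa, cant, agregados)
def bolsasInnerA (prods : List Int) (P : Int) (j : Nat) (bolsa : List Int) (cant : Int)
    (agr : PySem.Set Nat) : List Int × Int × PySem.Set Nat :=
  if h : j < prods.length then
    if agr.contains j then bolsasInnerA prods P (j + 1) bolsa cant agr   -- if j in agregados: continue
    else
      let x := PySem.List.pyGetD prods (j : Int) 0                      -- productos[j] (j < len)
      if x + cant ≤ P then
        if cant + x = P then (bolsa ++ [x], cant + x, agr.add j)        -- break after adding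
        else bolsasInnerA prods P (j + 1) (bolsa ++ [x]) (cant + x) (agr.add j)
      else
        if cant = P then (bolsa, cant, agr)                             -- 'if cant_actual == P: break'
        else bolsasInnerA prods P (j + 1) bolsa cant agr
  else (bolsa, cant, agr)
termination_by prods.length - j

-- outer loop 'for i in range(len(productos))', state (bolsas, agregados)
def bolsasOuterA (prods : List Int) (P : Int) (i : Nat) (bolsas : List (List Int))
    (agr : PySem.Set Nat) : List (List Int) :=
  if _h : i < prods.length then
    if agr.contains i then bolsasOuterA prods P (i + 1) bolsas agr      -- if i in agregados: continue
    else
      let x := PySem.List.pyGetD prods (i : Int) 0                      -- productos[i] (i < len)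
      let agr1 := agr.add i
      if x = P then bolsasOuterA prods P (i + 1) (bolsas ++ [[x]]) agr1 -- cant_actual == P: continue
      else
        let r := bolsasInnerA prods P i [x] x agr1
        bolsasOuterA prods P (i + 1) (bolsas ++ [r.1]) r.2.2
  else bolsas
termination_by prods.length - i

def bolsas_super (productos : List Int) (P : Int) : List (List Int) :=
  bolsasOuterA (PySem.List.sorted productos (fun x => x) true) P 0 [] PySem.Set.empty

-- ===== PORT B =====
-- B's inner while-loop with break: one pass over the remaining items, returning
-- (items added to the bag, items left over — skipped ones plus the tail after a break)
def bolsasFillB (P : Int) (cant : Int) : List Int → List Int × List Int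
  | [] => ([], [])
  | y :: ys =>
    if y + cant ≤ P then
      if cant + y = P then ([y], ys)                                    -- break: tail is left over
      else
        let r := bolsasFillB P (cant + y) ys
        (y :: r.1, r.2)
    else
      let r := bolsasFillB P cant ys
      (r.1, y :: r.2)

theorem bolsasFillB_len (P cant : Int) (xs : List Int) :
    (bolsasFillB P cant xs).2.length ≤ xs.length := by
  induction xs generalizing cant with
  | nil => simp [bolsasFillB]
  | cons y ys ih =>
    simp only [bolsasFillB]
    split_ifs <;> simp
    · exact le_trans (ih _) (Nat.le_succ _)
    · exact ih _

-- B's outer while-loop over the shrinking list of remaining items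
def bolsasOuterB (P : Int) : List Int → List (List Int)
  | [] => []
  | x :: rest =>
    if x = P then [x] :: bolsasOuterB P rest
    else
      let r := bolsasFillB P x rest
      (x :: r.1) :: bolsasOuterB P r.2
termination_by rest => rest.length
decreasing_by
  all_goals simp
  all_goals first
    | omega
    | exact Nat.lt_succ_of_le (bolsasFillB_len P x rest)
    | exact bolsasFillB_len P x rest

def bolsas_super_alt (productos : List Int) (P : Int) : List (List Int) :=
  bolsasOuterB P (PySem.List.sorted productos (fun x => x) true)

-- ===== PRECONDITION & SPEC =====
def Spec_bolsas_super (productos : List Int) (P : Int) (out : List (List Int)) : Prop := out = bolsas_super_alt productos P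
instance (productos : List Int) (P : Int) (out : List (List Int)) : Decidable (Spec_bolsas_super productos P out) := by unfold Spec_bolsas_super; infer_instance

-- ===== CLAIM (what is proved, stated in full; the proofs are below) =====
def Claim_equal_bolsas_super : Prop := ∀ (productos : List Int) (P : Int), Dom_bolsas_super productos P → Spec_bolsas_super productos P (bolsas_super productos P)

-- ===== LEMMAS AND PROOFS =====

-- the items of prods at indices ≥ j that are not in agr, in index order
def remIdx (prods : List Int) (agr : PySem.Set Nat) (j : Nat) : List Int :=
  if h : j < prods.length then
    if j ∈ agr then remIdx prods agr (j + 1)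
    else prods[j] :: remIdx prods agr (j + 1)
  else []
termination_by prods.length - j

theorem remIdx_unfold (prods : List Int) (agr : PySem.Set Nat) (j : Nat) :
    remIdx prods agr j = if j < prods.length then
      (if j ∈ agr then remIdx prods agr (j + 1)
       else prods.getD j 0 :: remIdx prods agr (j + 1))
    else [] := by
  rw [remIdx]
  split_ifs with h1 h2 <;> simp [List.getD, h1]

theorem remIdx_congr (prods : List Int) (agr agr' : PySem.Set Nat) (j : Nat)
    (h : ∀ k, j ≤ k → (k ∈ agr ↔ k ∈ agr')) : remIdx prods agr j = remIdx prods agr' j := by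
  have main : ∀ m j, prods.length - j ≤ m → (∀ k, j ≤ k → (k ∈ agr ↔ k ∈ agr')) →
      remIdx prods agr j = remIdx prods agr' j := by
    intro m
    induction m with
    | zero =>
      intro j hm _
      rw [remIdx_unfold prods agr j, remIdx_unfold prods agr' j]
      simp only [if_neg (by omega : ¬ j < prods.length)]
    | succ m ih =>
      intro j hm hme
      rw [remIdx_unfold prods agr j, remIdx_unfold prods agr' j]
      by_cases hj : j < prods.length
      · simp only [if_pos hj]
        have hrec := ih (j + 1) (by omega) (fun k hk => hme k (by omega))
        have hmem : (j ∈ agr) ↔ (j ∈ agr') := hme j le_rfl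
        by_cases hin : j ∈ agr
        · rw [if_pos hin, if_pos (hmem.mp hin), hrec]
        · rw [if_neg hin, if_neg (fun c => hin (hmem.mpr c)), hrec]
      · simp only [if_neg hj]
  exact main (prods.length - j) j le_rfl h

theorem remIdx_add_lt (prods : List Int) (agr : PySem.Set Nat) (k j : Nat) (hk : k < j) :
    remIdx prods (agr.add k) j = remIdx prods agr j := by
  refine remIdx_congr prods _ agr j (fun i hi => ?_)
  rw [PySem.Set.mem_add]
  have hne : i ≠ k := by omega
  tauto

theorem remIdx_empty (prods : List Int) (j : Nat) :
    remIdx prods PySem.Set.empty j = prods.drop j := by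
  have main : ∀ m j, prods.length - j ≤ m → remIdx prods PySem.Set.empty j = prods.drop j := by
    intro m
    induction m with
    | zero =>
      intro j hm
      rw [remIdx_unfold]
      simp only [if_neg (by omega : ¬ j < prods.length)]
      exact (List.drop_eq_nil_of_le (by omega)).symm
    | succ m ih =>
      intro j hm
      rw [remIdx_unfold]
      by_cases hj : j < prods.length
      · simp only [if_pos hj]
        rw [if_neg (by simp [PySem.Set.empty])]
        rw [ih (j + 1) (by omega), List.drop_eq_getElem_cons hj]
        simp [List.getD, hj]
      · simp only [if_neg hj]
        exact (List.drop_eq_nil_of_le (by omega)).symm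
  exact main (prods.length - j) j le_rfl

theorem innerA_unfold (prods : List Int) (P : Int) (j : Nat) (bolsa : List Int) (cant : Int)
    (agr : PySem.Set Nat) :
    bolsasInnerA prods P j bolsa cant agr =
      if j < prods.length then
        if j ∈ agr then bolsasInnerA prods P (j + 1) bolsa cant agr
        else
          let x := prods.getD j 0
          if x + cant ≤ P then
            if cant + x = P then (bolsa ++ [x], cant + x, agr.add j)
            else bolsasInnerA prods P (j + 1) (bolsa ++ [x]) (cant + x) (agr.add j)
          else
            if cant = P then (bolsa, cant, agr)
            else bolsasInnerA prods P (j + 1) bolsa cant agr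
      else (bolsa, cant, agr) := by
  rw [bolsasInnerA]
  by_cases h1 : j < prods.length
  · rw [dif_pos h1, if_pos h1]
    by_cases h2 : j ∈ agr
    · rw [if_pos (by simp [PySem.Set.contains, h2]), if_pos h2]
    · rw [if_neg (by simp [PySem.Set.contains, h2]), if_neg h2]
      simp only [PySem.List.pyGetD_natCast]
  · rw [dif_neg h1, if_neg h1]

theorem outerA_unfold (prods : List Int) (P : Int) (i : Nat) (bolsas : List (List Int))
    (agr : PySem.Set Nat) :
    bolsasOuterA prods P i bolsas agr =
      if i < prods.length then
        if i ∈ agr then bolsasOuterA prods P (i + 1) bolsas agr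
        else
          let x := prods.getD i 0
          let agr1 := agr.add i
          if x = P then bolsasOuterA prods P (i + 1) (bolsas ++ [[x]]) agr1
          else
            let r := bolsasInnerA prods P i [x] x agr1
            bolsasOuterA prods P (i + 1) (bolsas ++ [r.1]) r.2.2
      else bolsas := by
  rw [bolsasOuterA]
  by_cases h1 : i < prods.length
  · rw [dif_pos h1, if_pos h1]
    by_cases h2 : i ∈ agr
    · rw [if_pos (by simp [PySem.Set.contains, h2]), if_pos h2]
    · rw [if_neg (by simp [PySem.Set.contains, h2]), if_neg h2]
      simp only [PySem.List.pyGetD_natCast]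
  · rw [dif_neg h1, if_neg h1]

theorem innerA_eq (prods : List Int) (P : Int) (j : Nat) (bolsa : List Int) (cant : Int)
    (agr : PySem.Set Nat) (hc : cant ≠ P) :
    ∃ c' agr', bolsasInnerA prods P j bolsa cant agr
        = (bolsa ++ (bolsasFillB P cant (remIdx prods agr j)).1, c', agr')
      ∧ remIdx prods agr' j = (bolsasFillB P cant (remIdx prods agr j)).2
      ∧ (∀ k, k < j → (k ∈ agr' ↔ k ∈ agr)) := by
  have main : ∀ m j bolsa cant agr, prods.length - j ≤ m → cant ≠ P →
      ∃ c' agr', bolsasInnerA prods P j bolsa cant agr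
          = (bolsa ++ (bolsasFillB P cant (remIdx prods agr j)).1, c', agr')
        ∧ remIdx prods agr' j = (bolsasFillB P cant (remIdx prods agr j)).2
        ∧ (∀ k, k < j → (k ∈ agr' ↔ k ∈ agr)) := by
    intro m
    induction m with
    | zero =>
      intro j bolsa cant agr hm hc
      have hj : ¬ j < prods.length := by omega
      rw [innerA_unfold, if_neg hj, remIdx_unfold, if_neg hj]
      exact ⟨cant, agr, by simp [bolsasFillB], by rw [remIdx_unfold, if_neg hj]; simp [bolsasFillB],
        fun k _ => Iff.rfl⟩
    | succ m ih =>
      intro j bolsa cant agr hm hc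
      by_cases hj : j < prods.length
      · rw [innerA_unfold, if_pos hj]
        by_cases hin : j ∈ agr
        · -- continue: index already packed
          rw [if_pos hin]
          obtain ⟨c', agr', h1, h2, h3⟩ := ih (j + 1) bolsa cant agr (by omega) hc
          refine ⟨c', agr', ?_, ?_, fun k hk => h3 k (by omega)⟩
          · rw [h1, remIdx_unfold prods agr j, if_pos hj, if_pos hin]
          · rw [remIdx_unfold prods agr', if_pos hj,
              if_pos ((h3 j (by omega)).mpr hin), h2,
              remIdx_unfold prods agr j, if_pos hj, if_pos hin]
        · rw [if_neg hin]
          have hrem : remIdx prods agr j = prods.getD j 0 :: remIdx prods agr (j + 1) := by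
            rw [remIdx_unfold, if_pos hj, if_neg hin]
          set x := prods.getD j 0 with hx
          by_cases hfit : x + cant ≤ P
          · rw [if_pos hfit]
            by_cases hbrk : cant + x = P
            · -- add x, then break
              rw [if_pos hbrk]
              refine ⟨cant + x, agr.add j, ?_, ?_, fun k hk => ?_⟩
              · rw [hrem]; simp [bolsasFillB, hfit, hbrk]
              · rw [remIdx_unfold prods (agr.add j) j, if_pos hj,
                  if_pos (by rw [PySem.Set.mem_add]; right; rfl),
                  remIdx_add_lt prods agr j (j + 1) (by omega), hrem]
                simp [bolsasFillB, hfit, hbrk]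
              · rw [PySem.Set.mem_add]
                have : k ≠ j := by omega
                tauto
            · -- add x and keep scanning
              rw [if_neg hbrk]
              obtain ⟨c', agr', h1, h2, h3⟩ :=
                ih (j + 1) (bolsa ++ [x]) (cant + x) (agr.add j) (by omega) hbrk
              rw [remIdx_add_lt prods agr j (j + 1) (by omega)] at h1 h2
              have hj' : j ∈ agr' := (h3 j (by omega)).mpr (by rw [PySem.Set.mem_add]; right; rfl)
              refine ⟨c', agr', ?_, ?_, fun k hk => ?_⟩
              · rw [h1, hrem]; simp [bolsasFillB, hfit, hbrk]
              · rw [remIdx_unfold prods agr', if_pos hj, if_pos hj', h2, hrem]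
                simp [bolsasFillB, hfit, hbrk]
              · rw [(h3 k (by omega)), PySem.Set.mem_add]
                have : k ≠ j := by omega
                tauto
          · -- does not fit: skip x (cant ≠ P, so no break)
            rw [if_neg hfit, if_neg hc]
            obtain ⟨c', agr', h1, h2, h3⟩ := ih (j + 1) bolsa cant agr (by omega) hc
            have hj' : j ∉ agr' := fun c => hin ((h3 j (by omega)).mp c)
            refine ⟨c', agr', ?_, ?_, fun k hk => h3 k (by omega)⟩
            · rw [h1, hrem]; simp [bolsasFillB, hfit]
            · rw [remIdx_unfold prods agr', if_pos hj, if_neg hj', h2, hrem]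
              simp only [bolsasFillB, if_neg hfit]
              rw [hx, List.getD_eq_getElem?_getD]
      · rw [innerA_unfold, if_neg hj, remIdx_unfold, if_neg hj]
        exact ⟨cant, agr, by simp [bolsasFillB], by rw [remIdx_unfold, if_neg hj]; simp [bolsasFillB],
          fun k _ => Iff.rfl⟩
  exact main (prods.length - j) j bolsa cant agr le_rfl hc

theorem outerA_eq (prods : List Int) (P : Int) (i : Nat) (bolsas : List (List Int))
    (agr : PySem.Set Nat) :
    bolsasOuterA prods P i bolsas agr = bolsas ++ bolsasOuterB P (remIdx prods agr i) := by
  have main : ∀ m i bolsas agr, prods.length - i ≤ m →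
      bolsasOuterA prods P i bolsas agr = bolsas ++ bolsasOuterB P (remIdx prods agr i) := by
    intro m
    induction m with
    | zero =>
      intro i bolsas agr hm
      have hi : ¬ i < prods.length := by omega
      rw [outerA_unfold, if_neg hi, remIdx_unfold, if_neg hi]
      simp [bolsasOuterB]
    | succ m ih =>
      intro i bolsas agr hm
      by_cases hi : i < prods.length
      · rw [outerA_unfold, if_pos hi]
        by_cases hin : i ∈ agr
        · rw [if_pos hin, ih (i + 1) bolsas agr (by omega),
            remIdx_unfold prods agr i, if_pos hi, if_pos hin]
        · rw [if_neg hin]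
          have hrem : remIdx prods agr i = prods.getD i 0 :: remIdx prods agr (i + 1) := by
            rw [remIdx_unfold, if_pos hi, if_neg hin]
          set x := prods.getD i 0 with hx
          by_cases hp : x = P
          · rw [if_pos hp, ih (i + 1) (bolsas ++ [[x]]) (agr.add i) (by omega),
              remIdx_add_lt prods agr i (i + 1) (by omega), hrem]
            rw [bolsasOuterB, if_pos hp]
            simp
          · rw [if_neg hp]
            -- first inner step: j = i is already in agregados, so it is skipped
            have hstep : bolsasInnerA prods P i [x] x (agr.add i)
                = bolsasInnerA prods P (i + 1) [x] x (agr.add i) := by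
              rw [innerA_unfold, if_pos hi, if_pos (by rw [PySem.Set.mem_add]; right; rfl)]
            obtain ⟨c', agr', h1, h2, h3⟩ :=
              innerA_eq prods P (i + 1) [x] x (agr.add i) hp
            rw [remIdx_add_lt prods agr i (i + 1) (by omega)] at h1 h2
            rw [hstep, h1]
            rw [ih (i + 1) _ agr' (by omega), h2, hrem, bolsasOuterB, if_neg hp]
            simp
      · rw [outerA_unfold, if_neg hi, remIdx_unfold, if_neg hi]
        simp [bolsasOuterB]
  exact main (prods.length - i) i bolsas agr le_rfl

-- ===== VERDICT (by name: the statement is the Claim_ definition above) =====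
theorem bolsas_super_spec : Claim_equal_bolsas_super := by
  intro productos P _
  unfold Spec_bolsas_super bolsas_super bolsas_super_alt
  rw [outerA_eq, remIdx_empty, List.drop_zero, List.nil_append]
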